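-- pv_equiv track=rewrite | github.com/Denis2999/HW_for_Web_Academy | Python_Kolmykov_HW_2/Ex.5.py | compare_sequence
-- ===== SOURCE A (Python) =====
-- def compare_sequence(list_1, list_2):
--     counter = 0
--     for i in list_1:
--         if i in list_2:
--             counter += 1
--     if counter > 0:
--         return True
--     else:
--         return False
-- ===== SOURCE B (Python) =====
-- def compare_sequence(list_1, list_2):
--     return len(set(list_1) & set(list_2)) > 0
-- ===== Notes on version B (the rewrite author's own statement) =====
-- stated objective: idiomatic
-- what changed: Replaced the explicit counting loop with quadratic membership tests by building two hash sets and testing whether their intersection is nonempty.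
import Mathlib
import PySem

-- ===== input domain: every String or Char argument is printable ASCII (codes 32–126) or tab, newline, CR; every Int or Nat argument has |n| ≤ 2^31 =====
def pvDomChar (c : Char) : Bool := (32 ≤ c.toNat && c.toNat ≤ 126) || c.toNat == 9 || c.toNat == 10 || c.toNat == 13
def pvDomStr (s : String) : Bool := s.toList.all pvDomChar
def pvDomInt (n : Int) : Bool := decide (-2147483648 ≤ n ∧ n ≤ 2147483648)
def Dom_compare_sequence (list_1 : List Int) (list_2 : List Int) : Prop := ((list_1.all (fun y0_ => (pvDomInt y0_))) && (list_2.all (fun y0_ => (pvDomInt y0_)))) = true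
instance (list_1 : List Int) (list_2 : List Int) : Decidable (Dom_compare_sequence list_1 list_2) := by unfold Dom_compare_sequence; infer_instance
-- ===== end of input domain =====

-- B replaces A's counting loop with membership tests by a set intersection nonemptiness test (idiomatic).

-- ===== PORT A =====
def compare_sequence (list_1 : List Int) (list_2 : List Int) : Bool :=
  let counter : Int := list_1.foldl (fun counter i => if list_2.contains i then counter + 1 else counter) 0
  if counter > 0 then true else false

-- ===== PORT B =====
def compare_sequence_alt (list_1 : List Int) (list_2 : List Int) : Bool :=
  PySem.Set.len (PySem.Set.inter (PySem.Set.ofList list_1) (PySem.Set.ofList list_2)) > 0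

-- ===== PRECONDITION & SPEC =====
def Spec_compare_sequence (list_1 : List Int) (list_2 : List Int) (out : Bool) : Prop := out = compare_sequence_alt list_1 list_2
instance (list_1 : List Int) (list_2 : List Int) (out : Bool) : Decidable (Spec_compare_sequence list_1 list_2 out) := by unfold Spec_compare_sequence; infer_instance

-- ===== CLAIM (what is proved, stated in full; the proofs are below) =====
def Claim_equal_compare_sequence : Prop := ∀ (list_1 : List Int) (list_2 : List Int), Dom_compare_sequence list_1 list_2 → Spec_compare_sequence list_1 list_2 (compare_sequence list_1 list_2)

-- ===== LEMMAS AND PROOFS =====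

-- A's loop just counts the elements of list_1 that lie in list_2.
theorem pv_foldl_count (list_2 : List Int) (l : List Int) (c : Int) :
    l.foldl (fun counter i => if list_2.contains i then counter + 1 else counter) c
      = c + (l.countP (fun i => list_2.contains i) : Int) := by
  induction l generalizing c with
  | nil => simp
  | cons x xs ih =>
    simp only [List.foldl_cons, List.countP_cons, ih]
    split_ifs with h
    · push_cast; ring
    · simp

-- A returns true iff some element of list_1 is in list_2.
theorem pv_A_iff (l1 l2 : List Int) :
    compare_sequence l1 l2 = true ↔ ∃ x ∈ l1, x ∈ l2 := by
  simp only [compare_sequence, pv_foldl_count]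
  have hpos : 0 < l1.countP (fun i => l2.contains i) ↔ ∃ x ∈ l1, x ∈ l2 := by
    rw [List.countP_pos_iff]; simp
  constructor
  · intro h
    split_ifs at h with hc
    · exact hpos.mp (by exact_mod_cast by simpa using hc)
  · intro h
    have : (0 : Int) < (l1.countP (fun i => l2.contains i) : Int) := by
      exact_mod_cast hpos.mpr h
    simp only [zero_add, gt_iff_lt, if_pos this]

-- B returns true iff some element of list_1 is in list_2.
theorem pv_B_iff (l1 l2 : List Int) :
    compare_sequence_alt l1 l2 = true ↔ ∃ x ∈ l1, x ∈ l2 := by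
  simp only [compare_sequence_alt, PySem.Set.len, decide_eq_true_eq]
  constructor
  · intro h
    have hne : PySem.Set.inter (PySem.Set.ofList l1) (PySem.Set.ofList l2) ≠ [] := by
      intro he; rw [he] at h; simp at h
    obtain ⟨x, hx⟩ := List.exists_mem_of_ne_nil _ hne
    have := (PySem.Set.mem_inter (PySem.Set.ofList l1) (PySem.Set.ofList l2) x).mp hx
    exact ⟨x, (PySem.Set.mem_ofList l1 x).mp this.1, (PySem.Set.mem_ofList l2 x).mp this.2⟩
  · rintro ⟨x, hx1, hx2⟩
    have hx : x ∈ PySem.Set.inter (PySem.Set.ofList l1) (PySem.Set.ofList l2) :=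
      (PySem.Set.mem_inter _ _ x).mpr ⟨(PySem.Set.mem_ofList l1 x).mpr hx1, (PySem.Set.mem_ofList l2 x).mpr hx2⟩
    have := List.length_pos_of_mem hx
    exact_mod_cast this

-- ===== VERDICT (by name: the statement is the Claim_ definition above) =====
theorem compare_sequence_spec : Claim_equal_compare_sequence := by
  intro l1 l2 _
  unfold Spec_compare_sequence
  have h := (pv_A_iff l1 l2).trans (pv_B_iff l1 l2).symm
  exact Bool.coe_iff_coe.mp h
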